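-- pv_equiv track=rewrite | github.com/marwa9/VHV-Data-Decoding | Decoder.py | int_to_bcd
-- ===== SOURCE A (Python) =====
-- def int_to_bcd(x):
--     """
--     This translates an integer into
--     binary coded decimal
--     >>> int_to_bcd(4)
--     4
--     >>> int_to_bcd(34)
--     22
--     """
--
--     if x==0: return 0
--     if x < 0:
--         raise ValueError("Cannot be a negative integer")
--
--     bcdstring = ''
--     while x > 0:
--         nibble = x % 16
--         bcdstring = str(nibble) + bcdstring
--         x >>= 4
--     return int(bcdstring)
-- ===== SOURCE B (Python) =====
-- def int_to_bcd(x):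
--     """
--     This translates an integer into
--     binary coded decimal
--     >>> int_to_bcd(4)
--     4
--     >>> int_to_bcd(34)
--     22
--     """
--     if x < 0:
--         raise ValueError("Cannot be a negative integer")
--     if x < 16:
--         return x
--     return int(str(int_to_bcd(x >> 4)) + str(x % 16))
-- ===== Notes on version B (the rewrite author's own statement) =====
-- stated objective: simpler
-- what changed: B is a three-line recursion on the high nibbles (convert x>>4 recursively, then concatenate the low nibble's decimal digits and reparse), replacing A's explicit while loop that prepends nibble strings and parses once at the end; Pre_ excludes only negative inputs, on which A raises ValueError (and B likewise).
import Mathlib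
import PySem

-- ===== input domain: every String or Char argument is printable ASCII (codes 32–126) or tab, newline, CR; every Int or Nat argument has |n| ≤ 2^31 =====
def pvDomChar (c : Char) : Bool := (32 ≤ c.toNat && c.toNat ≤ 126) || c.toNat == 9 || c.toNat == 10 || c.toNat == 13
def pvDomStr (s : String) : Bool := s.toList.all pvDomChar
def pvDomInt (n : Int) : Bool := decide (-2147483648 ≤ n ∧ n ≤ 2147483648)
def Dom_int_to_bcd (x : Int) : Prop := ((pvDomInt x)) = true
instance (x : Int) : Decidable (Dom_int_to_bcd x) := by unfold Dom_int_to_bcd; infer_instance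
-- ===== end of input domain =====

-- B replaces A's string-prepending while loop with a three-line recursion on the high
-- nibbles (objective: simpler). Equivalence of RETURN values on x ≥ 0 (both raise for x < 0).

-- ===== PORT A =====
-- int(s): every string parsed here is a nonempty concatenation of str(nibble) for nibbles
-- 0..15 and of a str() of an earlier nonnegative result — pure decimal digits, no sign,
-- no whitespace, no '_' — on which Python's int() is plain base-10 digit folding; it is
-- ported by hand as exactly that fold (exact on every reachable string).
def pvParseDigits (cs : List Char) : Int :=
  cs.foldl (fun acc c => acc * 10 + ((c.toNat : Int) - 48)) 0

-- the while loop: bcdstring = str(nibble) + bcdstring; x >>= 4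
def pvLoopA (x : Int) (bcd : List Char) : List Char :=
  if h : 0 < x then
    pvLoopA (x >>> (4:Nat)) (PySem.Int.toChars (PySem.Int.mod x 16) ++ bcd)
  else bcd
termination_by x.toNat
decreasing_by
  have h16 : x >>> (4:Nat) = x / 16 := by
    simp [Int.shiftRight_eq_div_pow]
  omega

def int_to_bcd (x : Int) : Int :=
  if x = 0 then 0
  else pvParseDigits (pvLoopA x [])

-- ===== PORT B =====
def int_to_bcd_alt (x : Int) : Int :=
  if x < 0 then 0   -- Python B raises ValueError here; excluded by Pre_
  else if h : x < 16 then x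
  else pvParseDigits
    (PySem.Int.toChars (int_to_bcd_alt (x >>> (4:Nat))) ++ PySem.Int.toChars (PySem.Int.mod x 16))
termination_by x.toNat
decreasing_by
  have h16 : x >>> (4:Nat) = x / 16 := by
    simp [Int.shiftRight_eq_div_pow]
  omega

-- ===== PRECONDITION & SPEC =====
-- Pre_ excludes exactly the negative inputs, on which both Pythons raise ValueError.
def Pre_int_to_bcd (x : Int) : Prop := 0 ≤ x
instance (x : Int) : Decidable (Pre_int_to_bcd x) := by unfold Pre_int_to_bcd; infer_instance
def pvWitness_int_to_bcd : Int := (34)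

def Spec_int_to_bcd (x : Int) (out : Int) : Prop := out = int_to_bcd_alt x
instance (x : Int) (out : Int) : Decidable (Spec_int_to_bcd x out) := by unfold Spec_int_to_bcd; infer_instance

-- ===== CLAIM (what is proved, stated in full; the proofs are below) =====
def Claim_equal_int_to_bcd : Prop := ∀ (x : Int), Dom_int_to_bcd x → Pre_int_to_bcd x → Spec_int_to_bcd x (int_to_bcd x)

-- ===== LEMMAS AND PROOFS =====

-- the digit fold is affine in its accumulator
theorem pvParse_foldl_affine (cs : List Char) (a : Int) :
    cs.foldl (fun acc c => acc * 10 + ((c.toNat : Int) - 48)) a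
      = a * 10 ^ cs.length + pvParseDigits cs := by
  induction cs generalizing a with
  | nil => simp [pvParseDigits]
  | cons c cs ih =>
    simp only [List.foldl_cons, List.length_cons, pvParseDigits] at *
    rw [ih, ih (0 * 10 + _)]
    ring

theorem pvParse_append (cs ds : List Char) :
    pvParseDigits (cs ++ ds) = pvParseDigits cs * 10 ^ ds.length + pvParseDigits ds := by
  unfold pvParseDigits
  rw [List.foldl_append, pvParse_foldl_affine]
  rfl

-- round-trip: parsing str(n) back gives n, for nonnegative n
theorem pvParse_toDigitsCore (f : Nat) : ∀ (n : Nat) (acc : List Char), n < 10 ^ f →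
    pvParseDigits (Nat.toDigitsCore 10 f n acc) = (n : Int) * 10 ^ acc.length + pvParseDigits acc := by
  induction f with
  | zero =>
    intro n acc h
    interval_cases n
    simp [Nat.toDigitsCore]
  | succ f ih =>
    intro n acc h
    have hd : pvParseDigits (Nat.digitChar (n % 10) :: acc)
        = ((n % 10 : Nat) : Int) * 10 ^ acc.length + pvParseDigits acc := by
      have h10 : n % 10 < 10 := Nat.mod_lt _ (by omega)
      have hch : ((Nat.digitChar (n % 10)).toNat : Int) - 48 = ((n % 10 : Nat) : Int) := by
        interval_cases (n % 10) <;> decide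
      unfold pvParseDigits
      rw [List.foldl_cons, pvParse_foldl_affine]
      rw [show ((0:Int) * 10 + (((Nat.digitChar (n % 10)).toNat : Int) - 48)) = ((n % 10 : Nat) : Int) by
        rw [← hch]; ring]
      rfl
    rw [Nat.toDigitsCore]
    by_cases hz : n / 10 = 0
    · rw [if_pos hz, hd]
      have : n % 10 = n := by omega
      rw [this]
    · rw [if_neg hz]
      have hlt : n / 10 < 10 ^ f := by
        rw [pow_succ] at h
        omega
      rw [ih (n / 10) _ hlt, hd]
      simp only [List.length_cons, pow_succ]
      have hn : ((n / 10 : Nat) : Int) * 10 + ((n % 10 : Nat) : Int) = (n : Int) := by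
        have := Nat.div_add_mod n 10
        push_cast
        omega
      rw [← hn]
      ring

theorem pvParse_toChars (n : Int) (h : 0 ≤ n) :
    pvParseDigits (PySem.Int.toChars n) = n := by
  unfold PySem.Int.toChars
  rw [if_neg (by omega)]
  unfold Nat.toDigits
  have hf : n.toNat < 10 ^ (n.toNat + 1) := by
    calc n.toNat < 2 ^ (n.toNat + 1) := Nat.lt_two_pow_self.trans (Nat.pow_lt_pow_right (by omega) (by omega))
      _ ≤ 10 ^ (n.toNat + 1) := Nat.pow_le_pow_left (by omega) _
  rw [pvParse_toDigitsCore (n.toNat + 1) n.toNat [] hf]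
  simp [pvParseDigits]
  omega

theorem pvNibble_bounds (x : Int) : 0 ≤ PySem.Int.mod x 16 ∧ PySem.Int.mod x 16 < 16 := by
  have h1 : PySem.Int.mod x 16 = x % 16 := PySem.Int.mod_eq_emod_of_pos (by norm_num)
  constructor
  · rw [h1]; exact Int.emod_nonneg x (by norm_num)
  · rw [h1]; exact Int.emod_lt_of_pos x (by norm_num)

-- B's result is nonnegative on nonnegative input
theorem pvAlt_nonneg (x : Int) (h : 0 ≤ x) : 0 ≤ int_to_bcd_alt x := by
  induction x using int_to_bcd_alt.induct with
  | case1 x hx => omega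
  | case2 x hx hlt => rw [int_to_bcd_alt, if_neg hx, dif_pos hlt]; omega
  | case3 x hx hlt ih =>
    have hx4 : (0:Int) ≤ x >>> (4:Nat) := by
      have h16 : x >>> (4:Nat) = x / 16 := by simp [Int.shiftRight_eq_div_pow]
      omega
    rw [int_to_bcd_alt, if_neg hx, dif_neg hlt]
    rw [pvParse_append, pvParse_toChars _ (ih hx4)]
    have hb := pvNibble_bounds x
    have hnib : pvParseDigits (PySem.Int.toChars (PySem.Int.mod x 16)) = PySem.Int.mod x 16 :=
      pvParse_toChars _ hb.1
    rw [hnib]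
    have : (0:Int) < 10 ^ (PySem.Int.toChars (PySem.Int.mod x 16)).length := by positivity
    nlinarith [ih hx4]

-- A's loop builds its string as a prefix of the incoming accumulator
theorem pvLoopA_prefix_aux : ∀ (n : Nat) (x : Int), x.toNat = n → ∀ (cs : List Char), pvLoopA x cs = pvLoopA x [] ++ cs := by
  intro n
  induction n using Nat.strong_induction_on with
  | _ n ih =>
    intro x hxn cs
    by_cases h : 0 < x
    · have h16 : x >>> (4:Nat) = x / 16 := by simp [Int.shiftRight_eq_div_pow]
      have hlt : (x >>> (4:Nat)).toNat < n := by omega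
      rw [pvLoopA, dif_pos h]
      conv_rhs => rw [pvLoopA, dif_pos h]
      rw [ih _ hlt _ rfl, ih _ hlt _ rfl (PySem.Int.toChars (PySem.Int.mod x 16) ++ [])]
      simp
    · rw [pvLoopA, dif_neg h]
      conv_rhs => rw [pvLoopA, dif_neg h]
      simp

theorem pvLoopA_prefix (x : Int) (cs : List Char) : pvLoopA x cs = pvLoopA x [] ++ cs :=
  pvLoopA_prefix_aux x.toNat x rfl cs

-- main invariant: A's build-and-parse equals B's recursion
theorem pvMain (x : Int) (h : 0 ≤ x) : pvParseDigits (pvLoopA x []) = int_to_bcd_alt x := by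
  induction x using int_to_bcd_alt.induct with
  | case1 x hx => omega
  | case2 x hx hlt =>
    rw [int_to_bcd_alt, if_neg hx, dif_pos hlt]
    by_cases hz : x = 0
    · subst hz
      rw [pvLoopA, dif_neg (by omega)]
      rfl
    · have h4 : x >>> (4:Nat) = 0 := by
        have h16 : x >>> (4:Nat) = x / 16 := by simp [Int.shiftRight_eq_div_pow]
        omega
      have hm : PySem.Int.mod x 16 = x := by
        have h1 : PySem.Int.mod x 16 = x % 16 := PySem.Int.mod_eq_emod_of_pos (by norm_num)
        omega
      rw [pvLoopA, dif_pos (by omega), h4, pvLoopA, dif_neg (by omega), hm]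
      simpa using pvParse_toChars x h
  | case3 x hx hlt ih =>
    have hx4 : (0:Int) ≤ x >>> (4:Nat) := by
      have h16 : x >>> (4:Nat) = x / 16 := by simp [Int.shiftRight_eq_div_pow]
      omega
    rw [pvLoopA, dif_pos (by omega), pvLoopA_prefix]
    simp only [List.append_nil]
    rw [pvParse_append, ih hx4]
    conv_rhs => rw [int_to_bcd_alt, if_neg hx, dif_neg hlt]
    rw [pvParse_append, pvParse_toChars _ (pvAlt_nonneg _ hx4)]

-- ===== VERDICT (by name: the statement is the Claim_ definition above) =====
theorem int_to_bcd_spec : Claim_equal_int_to_bcd := by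
  intro x _ hpre
  unfold Pre_int_to_bcd at hpre
  unfold Spec_int_to_bcd int_to_bcd
  by_cases hz : x = 0
  · subst hz
    rw [if_pos rfl, int_to_bcd_alt, if_neg (by omega), dif_pos (by omega)]
  · rw [if_neg hz]
    exact pvMain x hpre
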